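-- pv_equiv track=rewrite | github.com/sevcak/advent-of-code-2025 | 2025/python/03/d03p02.py | maximum_joltage
-- ===== SOURCE A (Python) =====
-- def maximum_joltage(bank: list[int], battery_count: int = 12) -> int:
--     to_pick = min(len(bank), battery_count)
--
--     digits: list[int] = []
--
--     for i, digit in enumerate(bank):
--         remaining = len(bank) - i
--
--         # Try to slide the new digit as much to the left as possible, without:
--         # 1) Missing out on picking as much batteries as we can («to_pick»)
--         # 2) Decreasing our maximum possible result (We can't slide left digits lower than «digits[-1]»)
--         while len(digits) > 0 and digit > digits[-1] and len(digits) - 1 + remaining >= to_pick: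
--             digits.pop()
--
--         if len(digits) < to_pick:
--             digits.append(digit)
--
--     max_joltage = 0
--
--     for digit in digits[:to_pick]:
--         max_joltage = (max_joltage * 10) + digit
--
--     return max_joltage
-- ===== SOURCE B (Python) =====
-- def maximum_joltage(bank: list[int], battery_count: int = 12) -> int:
--     to_pick = min(len(bank), battery_count)
--
--     digits: list[int] = []
--     rest = bank
--     while len(digits) < to_pick:
--         # We may pick any digit that still leaves enough digits after it
--         # to complete the selection; take the leftmost maximum of that window.
--         window = rest[:len(rest) - (to_pick - len(digits)) + 1]
--         best_i, best_v = 0, window[0]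
--         for j, v in enumerate(window):
--             if v > best_v:
--                 best_i, best_v = j, v
--         digits.append(best_v)
--         rest = rest[best_i + 1:]
--
--     joltage = 0
--     for digit in digits:
--         joltage = (joltage * 10) + digit
--
--     return joltage
-- ===== Notes on version B (the rewrite author's own statement) =====
-- stated objective: alternative
-- what changed: Replaces the monotonic-stack pop/push pass over the bank with a direct greedy selection: for each output position B scans the still-feasible window of the remaining list for its leftmost maximum digit and recurses past it, then folds the picked digits into the number.
import Mathlib
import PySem

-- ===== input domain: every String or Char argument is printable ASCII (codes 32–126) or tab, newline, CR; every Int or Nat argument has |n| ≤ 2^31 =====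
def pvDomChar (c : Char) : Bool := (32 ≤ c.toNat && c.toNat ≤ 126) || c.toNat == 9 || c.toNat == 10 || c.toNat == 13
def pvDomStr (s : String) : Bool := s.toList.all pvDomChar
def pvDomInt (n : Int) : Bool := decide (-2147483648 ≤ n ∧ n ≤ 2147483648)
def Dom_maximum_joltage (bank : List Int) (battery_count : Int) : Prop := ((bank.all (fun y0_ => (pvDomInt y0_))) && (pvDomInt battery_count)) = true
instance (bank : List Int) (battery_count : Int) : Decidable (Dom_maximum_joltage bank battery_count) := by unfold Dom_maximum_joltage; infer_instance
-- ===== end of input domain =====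

-- B replaces A's monotonic-stack pass by windowed leftmost-max selection (alternative algorithm, same return value).

-- ===== PORT A =====
-- Python's inner `while` loop: pop from the end of `digits` while the top is smaller than
-- `digit` and popping still leaves enough room to pick `to_pick` batteries.
def popLoop (ds : List Int) (digit : Int) (remaining : Int) (to_pick : Int) : List Int :=
  match h : ds.getLast? with
  | none => ds
  | some top =>
    if top < digit ∧ (ds.length : Int) - 1 + remaining ≥ to_pick then
      popLoop ds.dropLast digit remaining to_pick
    else ds
termination_by ds.length
decreasing_by
  have hne : ds ≠ [] := by intro e; subst e; simp at h
  have : 0 < ds.length := List.length_pos_iff.mpr hne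
  simp [List.length_dropLast]; omega

def maximum_joltage (bank : List Int) (battery_count : Int) : Int :=
  let to_pick : Int := min (PySem.List.len bank) battery_count
  let digits : List Int :=
    (PySem.List.enumerate bank).foldl
      (fun ds p =>
        let remaining : Int := PySem.List.len bank - p.1
        let ds1 := popLoop ds p.2 remaining to_pick
        if (ds1.length : Int) < to_pick then ds1 ++ [p.2] else ds1)
      []
  (PySem.List.slice digits none (some to_pick)).foldl (fun acc d => acc * 10 + d) 0

-- ===== PORT B =====
-- Python's `for j, v in enumerate(window)` scan tracking the best (index, value) pair.
def argmaxLoop : List Int → Nat → Nat → Int → Nat × Int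
  | [], _, bi, bv => (bi, bv)
  | v :: rest, j, bi, bv =>
    if bv < v then argmaxLoop rest (j+1) j v else argmaxLoop rest (j+1) bi bv

-- Python's `while len(digits) < to_pick` loop, as a countdown on the picks still to make.
def selPick : List Int → Nat → List Int
  | _, 0 => []
  | rest, c+1 =>
    let w := rest.take (rest.length - (c+1) + 1)
    match w with
    | [] => []  -- unreachable: the window is nonempty whenever c+1 ≤ rest.length
    | w0 :: _ =>
      let p := argmaxLoop w 0 0 w0
      p.2 :: selPick (rest.drop (p.1 + 1)) c

def maximum_joltage_alt (bank : List Int) (battery_count : Int) : Int :=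
  let to_pick : Int := min (PySem.List.len bank) battery_count
  let digits := selPick bank to_pick.toNat
  digits.foldl (fun acc d => acc * 10 + d) 0

-- ===== PRECONDITION & SPEC =====
def Spec_maximum_joltage (bank : List Int) (battery_count : Int) (out : Int) : Prop := out = maximum_joltage_alt bank battery_count
instance (bank : List Int) (battery_count : Int) (out : Int) : Decidable (Spec_maximum_joltage bank battery_count out) := by unfold Spec_maximum_joltage; infer_instance

-- ===== CLAIM (what is proved, stated in full; the proofs are below) =====
def Claim_equal_maximum_joltage : Prop := ∀ (bank : List Int) (battery_count : Int), Dom_maximum_joltage bank battery_count → Spec_maximum_joltage bank battery_count (maximum_joltage bank battery_count)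

-- ===== LEMMAS AND PROOFS =====

-- A's main loop, recast as a recursion over the unprocessed suffix: `extra` counts the
-- elements of the full bank that lie beyond `xs`, so `remaining` at the head is |xs| + extra.
def runA (st : List Int) (xs : List Int) (extra : Nat) (k : Int) : List Int :=
  match xs with
  | [] => st
  | d :: tl =>
    let r : Int := (tl.length : Int) + 1 + (extra : Int)
    let st' := popLoop st d r k
    runA (if (st'.length : Int) < k then st' ++ [d] else st') tl extra k

lemma popLoop_nil (d r k : Int) : popLoop [] d r k = [] := by
  simp [popLoop]

lemma popLoop_concat (ys : List Int) (y d r k : Int) :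
    popLoop (ys ++ [y]) d r k =
      if y < d ∧ ((ys ++ [y]).length : Int) - 1 + r ≥ k then popLoop ys d r k
      else ys ++ [y] := by
  conv_lhs => rw [popLoop]
  split
  · next h => rw [List.getLast?_concat] at h; exact absurd h (by simp)
  · next top h =>
      rw [List.getLast?_concat] at h
      injection h with h
      subst h
      rw [List.dropLast_concat]

lemma popLoop_subset (d r k : Int) : ∀ (ds : List Int), ∀ x ∈ popLoop ds d r k, x ∈ ds := by
  intro ds
  induction ds using List.reverseRecOn with
  | nil => simp [popLoop_nil]
  | append_singleton ys y ih =>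
    intro x hx
    rw [popLoop_concat] at hx
    split_ifs at hx with hc
    · exact List.mem_append_left _ (ih x hx)
    · exact hx

lemma popLoop_length_le (d r k : Int) : ∀ (ds : List Int), (popLoop ds d r k).length ≤ ds.length := by
  intro ds
  induction ds using List.reverseRecOn with
  | nil => simp [popLoop_nil]
  | append_singleton ys y ih =>
    rw [popLoop_concat]
    split_ifs with hc
    · simp; omega
    · simp

lemma popLoop_pop_all (d r k : Int) (hrk : k ≤ r) :
    ∀ (st : List Int), (∀ x ∈ st, x < d) → popLoop st d r k = [] := by
  intro st
  induction st using List.reverseRecOn with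
  | nil => intro _; exact popLoop_nil d r k
  | append_singleton ys y ih =>
    intro hall
    rw [popLoop_concat]
    rw [if_pos]
    · exact ih (fun x hx => hall x (List.mem_append_left _ hx))
    · refine ⟨hall y (by simp), ?_⟩
      have : ((ys ++ [y]).length : Int) = (ys.length : Int) + 1 := by simp
      omega

lemma popLoop_cons (M d r k : Int) :
    ∀ (st : List Int), (M < d → r < k) →
    popLoop (M :: st) d r k = M :: popLoop st d r (k - 1) := by
  intro st
  induction st using List.reverseRecOn with
  | nil =>
    intro hMd
    rw [show ([M] : List Int) = [] ++ [M] from rfl, popLoop_concat]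
    have hneg : ¬ (M < d ∧ ((([] : List Int) ++ [M]).length : Int) - 1 + r ≥ k) := by
      rintro ⟨h1, h2⟩
      have := hMd h1
      simp at h2
      omega
    rw [if_neg hneg]
    simp [popLoop_nil]
  | append_singleton ys y ih =>
    intro hMd
    rw [show M :: (ys ++ [y]) = (M :: ys) ++ [y] from rfl, popLoop_concat, popLoop_concat]
    have hlen : (((M :: ys) ++ [y]).length : Int) - 1 + r ≥ k ↔
        ((ys ++ [y]).length : Int) - 1 + r ≥ k - 1 := by simp; omega
    by_cases hc : y < d ∧ (((M :: ys) ++ [y]).length : Int) - 1 + r ≥ k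
    · rw [if_pos hc, if_pos ⟨hc.1, hlen.mp hc.2⟩]
      exact ih hMd
    · have hc2 : ¬ (y < d ∧ ((ys ++ [y]).length : Int) - 1 + r ≥ k - 1) :=
        fun h => hc ⟨h.1, hlen.mpr h.2⟩
      rw [if_neg hc, if_neg hc2]
      simp

lemma runA_nil_nonpos (k : Int) (hk : k ≤ 0) :
    ∀ (xs : List Int) (extra : Nat), runA [] xs extra k = [] := by
  intro xs
  induction xs with
  | nil => intro extra; rfl
  | cons d tl ih =>
    intro extra
    rw [runA]
    simp only [popLoop_nil, List.length_nil]
    rw [if_neg (by omega)]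
    exact ih extra

lemma runA_append (k : Int) :
    ∀ (xs ys : List Int) (st : List Int) (extra : Nat),
    runA st (xs ++ ys) extra k = runA (runA st xs (ys.length + extra) k) ys extra k := by
  intro xs
  induction xs with
  | nil => intro ys st extra; rfl
  | cons d tl ih =>
    intro ys st extra
    rw [List.cons_append, runA, runA]
    have hr : ((tl ++ ys).length : Int) + 1 + (extra : Int)
        = (tl.length : Int) + 1 + ((ys.length + extra : Nat) : Int) := by
      simp; omega
    rw [hr]
    exact ih ys _ extra

lemma runA_mem (k : Int) :
    ∀ (xs : List Int) (st : List Int) (extra : Nat),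
    ∀ x ∈ runA st xs extra k, x ∈ st ∨ x ∈ xs := by
  intro xs
  induction xs with
  | nil => intro st extra x hx; exact Or.inl hx
  | cons d tl ih =>
    intro st extra x hx
    rw [runA] at hx
    have h2 := ih _ extra x hx
    rcases h2 with h2 | h2
    · split_ifs at h2 with hc
      · rcases List.mem_append.mp h2 with h3 | h3
        · exact Or.inl (popLoop_subset _ _ _ _ x h3)
        · simp at h3; subst h3; exact Or.inr (by simp)
      · exact Or.inl (popLoop_subset _ _ _ _ x h2)
    · exact Or.inr (List.mem_cons_of_mem _ h2)

lemma runA_length_le (k : Int) :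
    ∀ (xs : List Int) (st : List Int) (extra : Nat),
    (st.length : Int) ≤ k → ((runA st xs extra k).length : Int) ≤ k := by
  intro xs
  induction xs with
  | nil => intro st extra h; exact h
  | cons d tl ih =>
    intro st extra h
    rw [runA]
    apply ih
    have hp := popLoop_length_le d ((tl.length : Int) + 1 + (extra : Int)) k st
    split_ifs with hc
    · simp; omega
    · omega

lemma bridge (N k : Int) :
    ∀ (xs : List Int) (s : Int) (st : List Int), N = s + xs.length →
    (PySem.List.enumerate xs s).foldl
      (fun ds p =>
        let remaining : Int := N - p.1
        let ds1 := popLoop ds p.2 remaining k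
        if (ds1.length : Int) < k then ds1 ++ [p.2] else ds1)
      st
    = runA st xs 0 k := by
  intro xs
  induction xs with
  | nil => intro s st hN; simp [PySem.List.enumerate_nil, runA]
  | cons d tl ih =>
    intro s st hN
    rw [PySem.List.enumerate_cons, List.foldl_cons, runA]
    dsimp only
    have hr : N - s = (tl.length : Int) + 1 + ((0 : Nat) : Int) := by
      simp at hN ⊢; omega
    rw [hr]
    apply ih
    simp at hN ⊢; omega

lemma phase1 (M : Int) (e : Nat) (k : Int)
    (hk0 : 0 < k) (hke : k ≤ (1 : Int) + (e : Int)) :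
    ∀ (p : List Int), (∀ x ∈ p, x < M) → runA [] (p ++ [M]) e k = [M] := by
  intro p hall
  rw [runA_append]
  have hS : ∀ x ∈ runA [] p ([M].length + e) k, x < M := by
    intro x hx
    rcases runA_mem k p [] _ x hx with h | h
    · simp at h
    · exact hall x h
  rw [runA]
  simp only [List.length_nil, Nat.cast_zero]
  rw [popLoop_pop_all _ _ _ (by push_cast; omega) _ hS]
  simp only [List.length_nil, Nat.cast_zero, List.nil_append]
  rw [if_pos (by omega)]
  rfl

lemma phase2 (M : Int) :
    ∀ (xs : List Int) (extra : Nat) (k : Int) (st : List Int), 0 < k →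
    (∀ (j : Nat) (x : Int), j < xs.length → xs[j]? = some x →
       k ≤ ((xs.length + extra - j : Nat) : Int) → x ≤ M) →
    runA (M :: st) xs extra k = M :: runA st xs extra (k - 1) := by
  intro xs
  induction xs with
  | nil => intro extra k st hk H; rfl
  | cons d tl ih =>
    intro extra k st hk H
    rw [runA, runA]
    set r : Int := (tl.length : Int) + 1 + (extra : Int) with hr
    have hpop : popLoop (M :: st) d r k = M :: popLoop st d r (k - 1) := by
      apply popLoop_cons
      intro hMd
      by_contra hge
      rw [hr] at hge
      have hd : d ≤ M := by
        apply H 0 d (by simp) (by simp)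
        simp only [List.length_cons]
        omega
      omega
    rw [hpop]
    have hlen : ((M :: popLoop st d r (k - 1)).length : Int) < k ↔
        ((popLoop st d r (k - 1)).length : Int) < k - 1 := by simp; omega
    have Htl : ∀ (j : Nat) (x : Int), j < tl.length → tl[j]? = some x →
        k ≤ ((tl.length + extra - j : Nat) : Int) → x ≤ M := by
      intro j x hj hx hb
      apply H (j + 1) x (by simpa using hj) (by simpa using hx)
      have : ((d :: tl).length + extra - (j + 1) : Nat) = tl.length + extra - j := by
        simp; omega
      rw [this]; exact hb
    by_cases hc : ((popLoop st d r (k - 1)).length : Int) < k - 1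
    · rw [if_pos (hlen.mpr hc), if_pos hc,
        show M :: popLoop st d r (k - 1) ++ [d] = M :: (popLoop st d r (k - 1) ++ [d]) from rfl]
      exact ih extra k _ hk Htl
    · rw [if_neg (fun h => hc (hlen.mp h)), if_neg hc]
      exact ih extra k _ hk Htl

lemma argmax_spec :
    ∀ (lst : List Int) (w : List Int) (j bi : Nat) (bv : Int),
    w.drop j = lst → w[bi]? = some bv →
    (∀ p x, p < bi → w[p]? = some x → x < bv) →
    (∀ p x, p < j → w[p]? = some x → x ≤ bv) →
    w[(argmaxLoop lst j bi bv).1]? = some (argmaxLoop lst j bi bv).2 ∧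
    (∀ p x, p < (argmaxLoop lst j bi bv).1 → w[p]? = some x → x < (argmaxLoop lst j bi bv).2) ∧
    (∀ p x, p < w.length → w[p]? = some x → x ≤ (argmaxLoop lst j bi bv).2) := by
  intro lst
  induction lst with
  | nil =>
    intro w j bi bv hdrop hbi hlt hle
    have hwlen : w.length ≤ j := List.drop_eq_nil_iff.mp hdrop
    exact ⟨hbi, hlt, fun p x hp hx => hle p x (lt_of_lt_of_le hp hwlen) hx⟩
  | cons v rest ih =>
    intro w j bi bv hdrop hbi hlt hle
    have hj : w[j]? = some v := by
      have h0 : (w.drop j)[0]? = some v := by rw [hdrop]; rfl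
      rwa [List.getElem?_drop, Nat.add_zero] at h0
    have hrest : w.drop (j + 1) = rest := by
      rw [← List.drop_drop, hdrop]; rfl
    rw [argmaxLoop]
    split_ifs with hv
    · apply ih w (j + 1) j v hrest hj
      · intro p x hp hx
        exact lt_of_le_of_lt (hle p x hp hx) hv
      · intro p x hp hx
        rcases Nat.lt_succ_iff_lt_or_eq.mp hp with h | h
        · exact le_of_lt (lt_of_le_of_lt (hle p x h hx) hv)
        · subst h; rw [hj] at hx; injection hx with hx; omega
    · apply ih w (j + 1) bi bv hrest hbi hlt
      intro p x hp hx
      rcases Nat.lt_succ_iff_lt_or_eq.mp hp with h | h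
      · exact hle p x h hx
      · subst h; rw [hj] at hx; injection hx with hx; omega

lemma runA_eq_selPick :
    ∀ (k : Nat) (bank : List Int), k ≤ bank.length →
    runA [] bank 0 (k : Int) = selPick bank k := by
  intro k
  induction k with
  | zero =>
    intro bank _
    rw [Nat.cast_zero, runA_nil_nonpos 0 le_rfl bank 0]
    rfl
  | succ k ih =>
    intro bank hk
    have hn : 0 < bank.length := by omega
    have hwne : bank.take (bank.length - k) ≠ [] := by
      intro h
      rcases List.take_eq_nil_iff.mp h with h0 | h0
      · omega
      · rw [h0] at hn; simp at hn
    obtain ⟨w0, wt, hw⟩ := List.exists_cons_of_ne_nil hwne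
    set w := bank.take (bank.length - k) with hwdef
    have hw0 : w[0]? = some w0 := by rw [hw]; rfl
    obtain ⟨hm, hmlt, hmle⟩ :=
      argmax_spec w w 0 0 w0 rfl hw0
        (fun p x hp _ => absurd hp (Nat.not_lt_zero p))
        (fun p x hp _ => absurd hp (Nat.not_lt_zero p))
    set m := (argmaxLoop w 0 0 w0).1 with hmdef
    set M := (argmaxLoop w 0 0 w0).2 with hMdef
    have hwlen : w.length = bank.length - k := by
      rw [hwdef, List.length_take]; omega
    have hmw : m < w.length := (List.getElem?_eq_some_iff.mp hm).1
    have hmn : m < bank.length := by omega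
    have hwget : ∀ p : Nat, p < w.length → w[p]? = bank[p]? := by
      intro p hp
      rw [hwdef, List.getElem?_take_of_lt]
      omega
    have hbm : bank[m]? = some M := by rw [← hwget m hmw]; exact hm
    obtain ⟨hmn', hgM⟩ := List.getElem?_eq_some_iff.mp hbm
    have hsplit : bank = (bank.take m ++ [M]) ++ bank.drop (m + 1) := by
      rw [List.append_assoc, List.singleton_append]
      conv_lhs => rw [← List.take_append_drop m bank, List.drop_eq_getElem_cons hmn, hgM]
    set T := bank.drop (m + 1) with hTdef
    have hTlen : T.length = bank.length - (m + 1) := by rw [hTdef]; simp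
    have hkT : k ≤ T.length := by omega
    have hall : ∀ x ∈ bank.take m, x < M := by
      intro x hx
      obtain ⟨p, hp⟩ := List.mem_iff_getElem?.mp hx
      have hpm : p < m := by
        have := (List.getElem?_eq_some_iff.mp hp).1
        simpa using this.trans_le (by simp)
      apply hmlt p x hpm
      rw [hwget p (by omega), ← List.getElem?_take_of_lt hpm]
      exact hp
    have hK0 : (0 : Int) < ((k + 1 : Nat) : Int) := by push_cast; omega
    have hargmax_eq : argmaxLoop w 0 0 w0 = argmaxLoop (w0 :: wt) 0 0 w0 := by rw [← hw]
    calc runA [] bank 0 ((k + 1 : Nat) : Int)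
        = runA [] ((bank.take m ++ [M]) ++ T) 0 ((k + 1 : Nat) : Int) := by rw [← hsplit]
      _ = runA (runA [] (bank.take m ++ [M]) (T.length + 0) ((k + 1 : Nat) : Int)) T 0
            ((k + 1 : Nat) : Int) := runA_append _ _ _ _ _
      _ = runA [M] T 0 ((k + 1 : Nat) : Int) := by
            rw [phase1 M (T.length + 0) _ hK0 (by push_cast; omega) _ hall]
      _ = M :: runA [] T 0 (((k + 1 : Nat) : Int) - 1) := by
            apply phase2 M T 0 _ [] hK0
            intro j x hj hx hb
            have hjw : m + 1 + j < w.length := by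
              push_cast at hb
              omega
            apply hmle (m + 1 + j) x hjw
            rw [hwget _ hjw]
            rwa [hTdef, List.getElem?_drop] at hx
      _ = M :: selPick T k := by
            rw [show ((k + 1 : Nat) : Int) - 1 = (k : Int) by push_cast; omega, ih T hkT]
      _ = selPick bank (k + 1) := by
            conv_rhs => rw [selPick]
            dsimp only
            rw [show bank.length - (k + 1) + 1 = bank.length - k from by omega, ← hwdef, hw]
            dsimp only
            rw [← hargmax_eq, ← hmdef, ← hMdef, ← hTdef]

-- ===== VERDICT (by name: the statement is the Claim_ definition above) =====

theorem maximum_joltage_spec : Claim_equal_maximum_joltage := by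
  intro bank bc _
  unfold Spec_maximum_joltage maximum_joltage maximum_joltage_alt
  simp only [PySem.List.len_eq]
  set tp : Int := min (bank.length : Int) bc with htp
  have hb := bridge ((bank.length : Int)) tp bank 0 [] (by simp)
  dsimp only at hb
  rw [hb]
  have h1 : tp ≤ (bank.length : Int) := by rw [htp]; exact min_le_left _ _
  by_cases h : 0 ≤ tp
  · have hcast : ((tp.toNat : Nat) : Int) = tp := Int.toNat_of_nonneg h
    have hle : tp.toNat ≤ bank.length := by omega
    rw [← hcast, runA_eq_selPick tp.toNat bank hle]
    have hlen : (selPick bank tp.toNat).length ≤ tp.toNat := by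
      have h2 := runA_length_le ((tp.toNat : Nat) : Int) bank [] 0 (by simp)
      rw [runA_eq_selPick tp.toNat bank hle] at h2
      omega
    rw [PySem.List.slice_to _ (Int.natCast_nonneg _)]
    simp only [Int.toNat_natCast]
    rw [List.take_of_length_le hlen]
  · rw [Int.not_le] at h
    rw [runA_nil_nonpos tp (by omega) bank 0]
    have h0 : tp.toNat = 0 := by omega
    rw [h0]
    have hsl : PySem.List.slice ([] : List Int) none (some tp) = [] := by
      simp [PySem.List.slice]
    rw [hsl]
    rfl
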